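-- pv_equiv track=rewrite | github.com/cafe-jun/codingTest-Algo | programmers/2022KAKAOBLINDRECRUITMENT/양궁대회.py | solution
-- ===== SOURCE A (Python) =====
-- from itertools import combinations
--
-- def solution(n: int, info: list[int]):
--     answer = []
--     win_list = []
--     m = [i for i in range(11)]
--     # 10을 최소로 이기는 경우
--     for i in range(1, 11):
--         for combin in combinations(m, i):
--             result = check_win(info, combin, n)
--             if result[1] != [-1]:
--                 if not win_list:
--                     win_list.append(result)
--                 if (-1)*win_list[0][0] < (-1)*result[0]:
--                     win_list.clear()
--                     win_list.append(result)
--                 elif win_list[0][0] == result[0]: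
--                     win_list.append(result)
--     if not win_list:
--         return [-1]
--     min_answer = win_list[0][1]
--     for win_num in win_list:
--         target_list = win_num[1]
--         for i in range(10, -1, -1):
--             if min_answer[i] > target_list[i]:
--                 break
--             elif min_answer[i] < target_list[i]:
--                 min_answer = target_list
--                 break
--     answer = min_answer
--     return answer
--
-- def check_win(apeach, target, n):
--     arrow = n
--     iron = [0]*11
--     combi_list = sorted(list(target), reverse=True)
--     for score in combi_list:
--         apeach_ts = apeach[10-score]
--         if arrow < apeach_ts + 1:
--             iron[10 - score] += arrow
--             break
--         iron[10 - score] = apeach_ts + 1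
--         arrow -= (apeach_ts + 1)
--     else:
--         iron[10-score] += arrow
--     apeach_score = 0
--     iron_score = 0
--     for i in range(11):
--         if apeach[10-i] == 0 and iron[10-i] == 0:
--             continue
--         if apeach[10-i] < iron[10-i]:
--             iron_score += (i)
--         else:
--             apeach_score += (i)
--     else:
--         if iron_score > apeach_score:
--             return ((-1)*abs(iron_score-apeach_score), iron)
--         else:
--             return (0, [-1])
-- ===== SOURCE B (Python) =====
-- def solution(n, info):
--     # B: recursive backtracking over tier selections (10..0 take/skip), evaluating each
--     # selection of 1..10 tiers greedily and keeping the single best inline.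
--     def evaluate(chosen):  # chosen: strictly descending list of contested scores
--         iron = [0] * 11
--         arrows = n
--         for s in chosen:
--             need = info[10 - s] + 1
--             if arrows < need:          # can't outshoot Apeach here: dump the rest
--                 iron[10 - s] += arrows
--                 return iron
--             iron[10 - s] = need
--             arrows -= need
--         iron[10 - chosen[-1]] += arrows  # surplus goes to the lowest contested tier
--         return iron
--
--     def margin(iron):  # Ryan's score minus Apeach's (ties and 0-0 tiers per the rules)
--         diff = 0
--         for s in range(1, 11):
--             a, r = info[10 - s], iron[10 - s]
--             if a == 0 and r == 0:
--                 continue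
--             diff += s if a < r else -s
--         return diff
--
--     def better(d, iron, bd, biron):  # strictly better: bigger margin, then more
--         if d != bd:                  # arrows at the lower tiers (index 10 first)
--             return d > bd
--         for i in range(10, -1, -1):
--             if iron[i] != biron[i]:
--                 return iron[i] > biron[i]
--         return False
--
--     def dfs(score, chosen, best):
--         if score < 0:
--             if 1 <= len(chosen) <= 10:
--                 iron = evaluate(chosen)
--                 d = margin(iron)
--                 if d > 0 and (best is None or better(d, iron, best[0], best[1])):
--                     best = (d, iron)
--             return best
--         best = dfs(score - 1, chosen + [score], best)
--         best = dfs(score - 1, chosen, best)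
--         return best
--
--     best = dfs(10, [], None)
--     return best[1] if best is not None else [-1]
-- ===== Notes on version B (the rewrite author's own statement) =====
-- stated objective: alternative
-- what changed: Replaces the size-by-size itertools.combinations sweep with its two-phase best (collect every maximum-margin winner into win_list, then a separate reverse-index tie-break pass) by a recursive take/skip backtracking over the 11 tiers that evaluates each selection of 1..10 tiers and keeps a single best candidate inline under the combined (margin, low-tier counts) comparison.
import Mathlib
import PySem

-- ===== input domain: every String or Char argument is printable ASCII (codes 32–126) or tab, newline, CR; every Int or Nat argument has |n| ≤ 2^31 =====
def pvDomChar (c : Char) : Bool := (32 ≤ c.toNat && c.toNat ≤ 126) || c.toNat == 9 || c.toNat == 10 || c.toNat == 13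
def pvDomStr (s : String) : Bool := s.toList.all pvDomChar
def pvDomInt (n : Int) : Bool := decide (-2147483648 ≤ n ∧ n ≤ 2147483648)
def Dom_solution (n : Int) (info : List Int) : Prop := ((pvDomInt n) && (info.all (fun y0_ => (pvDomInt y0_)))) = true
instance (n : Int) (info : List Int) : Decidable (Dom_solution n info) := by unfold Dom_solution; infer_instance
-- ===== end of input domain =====

-- B replaces A's size-by-size itertools.combinations sweep plus two-phase best
-- (collect all maximum-margin winners, then a reverse-index tie-break pass) with a
-- take/skip backtracking over the tiers that keeps a single best candidate inline.

-- ===== PORT A =====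

-- itertools.combinations(xs, k): k-element subsequences in lexicographic order
def combosA : List Int → Nat → List (List Int)
  | _, 0 => [[]]
  | [], _ + 1 => []
  | x :: rest, k + 1 => (combosA rest k).map (x :: ·) ++ combosA rest (k + 1)

-- check_win's allocation loop (for/else with break); the for-else "iron[10-score] += arrow"
-- (leaked loop variable = last element) is folded into the last iteration.
def allocA (apeach : List Int) : List Int → List Int → Int → List Int
  | [], iron, _ => iron  -- unreachable in A's calls (Python would raise NameError in the for-else)
  | score :: rest, iron, arrow =>
      let ts := PySem.List.pyGetD apeach (10 - score) 0
      if arrow < ts + 1 then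
        PySem.List.pySetD iron (10 - score) (PySem.List.pyGetD iron (10 - score) 0 + arrow)  -- break
      else
        let iron' := PySem.List.pySetD iron (10 - score) (ts + 1)
        match rest with
        | [] => PySem.List.pySetD iron' (10 - score)
                  (PySem.List.pyGetD iron' (10 - score) 0 + (arrow - (ts + 1)))  -- for-else leftover
        | _ :: _ => allocA apeach rest iron' (arrow - (ts + 1))

-- check_win's scoring loop: state = (apeach_score, iron_score)
def scoreStepA (apeach iron : List Int) (p : Int × Int) (i : Int) : Int × Int :=
  let a := PySem.List.pyGetD apeach (10 - i) 0
  let r := PySem.List.pyGetD iron (10 - i) 0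
  if a = 0 ∧ r = 0 then p
  else if a < r then (p.1, p.2 + i) else (p.1 + i, p.2)

def check_win (apeach : List Int) (target : List Int) (n : Int) : Int × List Int :=
  let combi_list := PySem.List.sorted target (fun x => x) true
  let iron := allocA apeach combi_list (List.replicate 11 0) n
  let s := (PySem.List.pyRange 0 11 1).foldl (scoreStepA apeach iron) (0, 0)
  if s.2 > s.1 then ((-1) * ((s.2 - s.1).natAbs : Int), iron) else (0, [-1])

-- the body of the nested candidate loop maintaining win_list
def stepWin (info : List Int) (n : Int) (wl : List (Int × List Int)) (combin : List Int) :
    List (Int × List Int) :=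
  let result := check_win info combin n
  if result.2 ≠ [-1] then
    let wl1 := if wl.isEmpty then wl ++ [result] else wl
    if (-1) * (wl1.headD (0, [])).1 < (-1) * result.1 then [result]
    else if (wl1.headD (0, [])).1 = result.1 then wl1 ++ [result]
    else wl1
  else wl

-- the final tie-break scan "for i in range(10, -1, -1): …" with its two breaks
def cmpScanA (ma t : List Int) : List Int → List Int
  | [] => ma
  | i :: rest =>
      if PySem.List.pyGetD ma i 0 > PySem.List.pyGetD t i 0 then ma
      else if PySem.List.pyGetD ma i 0 < PySem.List.pyGetD t i 0 then t
      else cmpScanA ma t rest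

def solution (n : Int) (info : List Int) : List Int :=
  let m := PySem.List.pyRange 0 11 1
  let win_list := (PySem.List.pyRange 1 11 1).foldl
      (fun wl i => (combosA m i.toNat).foldl (stepWin info n) wl) []
  if win_list.isEmpty then [-1]
  else
    win_list.foldl (fun ma w => cmpScanA ma w.2 (PySem.List.pyRange 10 (-1) (-1)))
      ((win_list.headD (0, [])).2)

-- ===== PORT B =====

-- evaluate's loop; .inl = the early "return iron" when arrows run out
def evalGoB (info : List Int) : List Int → List Int → Int → (List Int ⊕ (List Int × Int))
  | [], iron, arrows => .inr (iron, arrows)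
  | s :: rest, iron, arrows =>
      let need := PySem.List.pyGetD info (10 - s) 0 + 1
      if arrows < need then
        .inl (PySem.List.pySetD iron (10 - s) (PySem.List.pyGetD iron (10 - s) 0 + arrows))
      else evalGoB info rest (PySem.List.pySetD iron (10 - s) need) (arrows - need)

def evalB (n : Int) (info : List Int) (chosen : List Int) : List Int :=
  match evalGoB info chosen (List.replicate 11 0) n with
  | .inl iron => iron
  | .inr (iron, arrows) =>
      let last := PySem.List.pyGetD chosen (-1) 0  -- chosen[-1]; chosen ≠ [] at every call
      PySem.List.pySetD iron (10 - last) (PySem.List.pyGetD iron (10 - last) 0 + arrows)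

def marginB (info iron : List Int) : Int :=
  (PySem.List.pyRange 1 11 1).foldl (fun diff s =>
      let a := PySem.List.pyGetD info (10 - s) 0
      let r := PySem.List.pyGetD iron (10 - s) 0
      if a = 0 ∧ r = 0 then diff
      else diff + (if a < r then s else -s)) 0

def betterGoB (iron biron : List Int) : List Int → Bool
  | [] => false
  | i :: rest =>
      if PySem.List.pyGetD iron i 0 ≠ PySem.List.pyGetD biron i 0 then
        PySem.List.pyGetD iron i 0 > PySem.List.pyGetD biron i 0
      else betterGoB iron biron rest

def betterB (d : Int) (iron : List Int) (bd : Int) (biron : List Int) : Bool :=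
  if d ≠ bd then d > bd else betterGoB iron biron (PySem.List.pyRange 10 (-1) (-1))

-- dfs's leaf: evaluate a complete selection and keep it if strictly better
def leafB (n : Int) (info : List Int) (chosen : List Int) (best : Option (Int × List Int)) :
    Option (Int × List Int) :=
  if 1 ≤ chosen.length ∧ chosen.length ≤ 10 then
    let iron := evalB n info chosen
    let d := marginB info iron
    if (decide (0 < d) && (match best with
        | none => true
        | some b => betterB d iron b.1 b.2)) = true then some (d, iron) else best
  else best

def dfsB (n : Int) (info : List Int) (score : Int) (chosen : List Int)
    (best : Option (Int × List Int)) : Option (Int × List Int) :=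
  if score < 0 then leafB n info chosen best
  else
    let b1 := dfsB n info (score - 1) (chosen ++ [score]) best
    dfsB n info (score - 1) chosen b1
termination_by (score + 1).toNat
decreasing_by all_goals omega

def solution_alt (n : Int) (info : List Int) : List Int :=
  match dfsB n info 10 [] none with
  | some b => b.2
  | none => [-1]

-- ===== PRECONDITION & SPEC =====
-- A indexes info[10-i] for i = 0..10 and raises IndexError when len(info) < 11 (B too).
def Pre_solution (n : Int) (info : List Int) : Prop := 11 ≤ info.length
instance (n : Int) (info : List Int) : Decidable (Pre_solution n info) := by
  unfold Pre_solution; infer_instance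

def pvWitness_solution : Int × List Int := (5, [2, 1, 1, 1, 0, 0, 0, 0, 0, 0, 0])

def Spec_solution (n : Int) (info : List Int) (out : List Int) : Prop := out = solution_alt n info
instance (n : Int) (info : List Int) (out : List Int) : Decidable (Spec_solution n info out) := by
  unfold Spec_solution; infer_instance

-- ===== CLAIM (what is proved, stated in full; the proofs are below) =====
def Claim_equal_solution : Prop := ∀ (n : Int) (info : List Int),
  Dom_solution n info → Pre_solution n info → Spec_solution n info (solution n info)

-- ===== LEMMAS AND PROOFS =====


-- ---------- proof-side machinery ----------

-- the reverse-index comparison both programs use (scan indices idx, first difference wins)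
def rcmp (x y : List Int) : List Int → Ordering
  | [] => .eq
  | i :: rest =>
      if PySem.List.pyGetD x i 0 < PySem.List.pyGetD y i 0 then .lt
      else if PySem.List.pyGetD y i 0 < PySem.List.pyGetD x i 0 then .gt
      else rcmp x y rest

def idx11 : List Int := PySem.List.pyRange 10 (-1) (-1)

def rlt (x y : List Int) : Prop := rcmp x y idx11 = .lt

-- strict "strictly better candidate" order on (margin, iron)
def eLt (x y : Int × List Int) : Prop := x.1 < y.1 ∨ (x.1 = y.1 ∧ rlt x.2 y.2)

-- the value / goodness of a selection, B-style
def valB (n : Int) (info : List Int) (c : List Int) : Int × List Int :=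
  (marginB info (evalB n info c), evalB n info c)

def goodB (n : Int) (info : List Int) (c : List Int) : Prop :=
  1 ≤ c.length ∧ c.length ≤ 10 ∧ 0 < (valB n info c).1

-- A's winners
def winA (n : Int) (info : List Int) (c : List Int) : Prop :=
  (check_win info c n).2 ≠ [-1]

def combosAll : List (List Int) :=
  (PySem.List.pyRange 1 11 1).flatMap
    (fun i => combosA (PySem.List.pyRange 0 11 1) i.toNat)

-- B's DFS leaf lists, indexed by fuel k (score = k - 1)
def subsetsN : Nat → List (List Int)
  | 0 => [[]]
  | k + 1 => (subsetsN k).map (((k : Int)) :: ·) ++ subsetsN k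

def dlistN : Nat → List Int
  | 0 => []
  | k + 1 => (k : Int) :: dlistN k

-- ---------- rcmp / eLt ----------

theorem rcmp_self (x : List Int) (idx : List Int) : rcmp x x idx = .eq := by
  induction idx with
  | nil => rfl
  | cons i rest ih => simp [rcmp, ih]

theorem rcmp_swap (x y : List Int) (idx : List Int) :
    rcmp y x idx = (rcmp x y idx).swap := by
  induction idx with
  | nil => rfl
  | cons i rest ih =>
      simp only [rcmp]
      rcases lt_trichotomy (PySem.List.pyGetD x i 0) (PySem.List.pyGetD y i 0) with h | h | h
      · simp [h, not_lt.mpr (le_of_lt h), Ordering.swap]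
      · simp [h, lt_irrefl, ih]
      · simp [h, not_lt.mpr (le_of_lt h), Ordering.swap]

theorem rcmp_eq_iff (x y : List Int) (idx : List Int) :
    rcmp x y idx = .eq ↔ ∀ i ∈ idx, PySem.List.pyGetD x i 0 = PySem.List.pyGetD y i 0 := by
  induction idx with
  | nil => simp [rcmp]
  | cons i rest ih =>
      simp only [rcmp, List.mem_cons]
      rcases lt_trichotomy (PySem.List.pyGetD x i 0) (PySem.List.pyGetD y i 0) with h | h | h
      · simp only [if_pos h]
        constructor
        · intro hh; exact absurd hh (by decide)
        · intro hh; exact absurd (hh i (Or.inl rfl)) (ne_of_lt h)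
      · simp only [if_neg (by omega : ¬ PySem.List.pyGetD x i 0 < PySem.List.pyGetD y i 0),
          if_neg (by omega : ¬ PySem.List.pyGetD y i 0 < PySem.List.pyGetD x i 0), ih]
        constructor
        · rintro hh j (rfl | hj)
          · exact h
          · exact hh j hj
        · intro hh j hj; exact hh j (Or.inr hj)
      · simp only [if_neg (by omega : ¬ PySem.List.pyGetD x i 0 < PySem.List.pyGetD y i 0),
          if_pos h]
        constructor
        · intro hh; exact absurd hh (by decide)
        · intro hh; exact absurd (hh i (Or.inl rfl)) (ne_of_gt h)

theorem rcmp_trans_lt (x y z : List Int) (idx : List Int)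
    (h1 : rcmp x y idx = .lt) (h2 : rcmp y z idx = .lt) : rcmp x z idx = .lt := by
  induction idx with
  | nil => simp [rcmp] at h1
  | cons i rest ih =>
      simp only [rcmp] at h1 h2 ⊢
      rcases lt_trichotomy (PySem.List.pyGetD x i 0) (PySem.List.pyGetD y i 0) with a | a | a
      · rcases lt_trichotomy (PySem.List.pyGetD y i 0) (PySem.List.pyGetD z i 0) with b | b | b
        · rw [if_pos (by omega)]
        · rw [if_pos (by omega)]
        · rw [if_neg (by omega), if_pos b] at h2; exact absurd h2 (by decide)
      · rcases lt_trichotomy (PySem.List.pyGetD y i 0) (PySem.List.pyGetD z i 0) with b | b | b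
        · rw [if_pos (by omega)]
        · rw [if_neg (by omega), if_neg (by omega)] at h1 h2 ⊢
          exact ih h1 h2
        · rw [if_neg (by omega), if_pos b] at h2; exact absurd h2 (by decide)
      · rw [if_neg (by omega), if_pos a] at h1; exact absurd h1 (by decide)

theorem mem_idx11_of_lt (k : Nat) (hk : k < 11) : ((k : Int)) ∈ idx11 := by
  interval_cases k <;> decide

theorem rcmp_eq11 (x y : List Int) (hx : x.length = 11) (hy : y.length = 11)
    (h : rcmp x y idx11 = .eq) : x = y := by
  rw [rcmp_eq_iff] at h
  apply List.ext_getElem (by omega)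
  intro k hk _
  have hm := h (k : Int) (mem_idx11_of_lt k (by omega))
  rw [PySem.List.pyGetD_natCast, PySem.List.pyGetD_natCast] at hm
  rwa [List.getD_eq_getElem x 0 hk, List.getD_eq_getElem y 0 (by omega)] at hm

theorem eLt_trans {a b c : Int × List Int} (h1 : eLt a b) (h2 : eLt b c) : eLt a c := by
  rcases h1 with h1 | ⟨e1, r1⟩ <;> rcases h2 with h2 | ⟨e2, r2⟩
  · exact Or.inl (lt_trans h1 h2)
  · exact Or.inl (e2 ▸ h1)
  · exact Or.inl (e1 ▸ h2)
  · exact Or.inr ⟨e1.trans e2, rcmp_trans_lt _ _ _ _ r1 r2⟩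

theorem eLt_tricho {a b : Int × List Int} (ha : a.2.length = 11) (hb : b.2.length = 11) :
    eLt a b ∨ eLt b a ∨ a = b := by
  rcases lt_trichotomy a.1 b.1 with h | h | h
  · exact Or.inl (Or.inl h)
  · cases hc : rcmp a.2 b.2 idx11 with
    | lt => exact Or.inl (Or.inr ⟨h, hc⟩)
    | eq => exact Or.inr (Or.inr (Prod.ext h (rcmp_eq11 _ _ ha hb hc)))
    | gt =>
        have : rcmp b.2 a.2 idx11 = .lt := by rw [rcmp_swap, hc]; rfl
        exact Or.inr (Or.inl (Or.inr ⟨h.symm, this⟩))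
  · exact Or.inr (Or.inl (Or.inl h))

-- ---------- lengths ----------

theorem length_evalGoB (info : List Int) :
    ∀ (d iron : List Int) (a : Int),
      (∀ i, evalGoB info d iron a = .inl i → i.length = iron.length)
      ∧ (∀ i ar, evalGoB info d iron a = .inr (i, ar) → i.length = iron.length) := by
  intro d
  induction d with
  | nil =>
      intro iron a
      constructor
      · intro i hi; simp [evalGoB] at hi
      · intro i ar hi; simp [evalGoB] at hi; rw [hi.1]
  | cons s rest ih =>
      intro iron a
      simp only [evalGoB]
      by_cases h : a < PySem.List.pyGetD info (10 - s) 0 + 1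
      · rw [if_pos h]
        constructor
        · intro i hi
          simp only [Sum.inl.injEq] at hi
          rw [← hi, PySem.List.length_pySetD]
        · intro i ar hi; simp at hi
      · rw [if_neg h]
        constructor
        · intro i hi
          have := (ih _ _).1 i hi
          rwa [PySem.List.length_pySetD] at this
        · intro i ar hi
          have := (ih _ _).2 i ar hi
          rwa [PySem.List.length_pySetD] at this

theorem length_evalB (n : Int) (info : List Int) (c : List Int) :
    (evalB n info c).length = 11 := by
  unfold evalB
  cases h : evalGoB info c (List.replicate 11 0) n with
  | inl i =>
      have := (length_evalGoB info c (List.replicate 11 0) n).1 i h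
      simpa using this
  | inr p =>
      obtain ⟨i, ar⟩ := p
      have := (length_evalGoB info c (List.replicate 11 0) n).2 i ar h
      simp only [PySem.List.length_pySetD]
      simpa using this

-- ---------- scan lemmas relating the ports' comparisons to rcmp ----------

theorem cmpScanA_eq (ma t : List Int) (idx : List Int) :
    cmpScanA ma t idx = if rcmp ma t idx = .lt then t else ma := by
  induction idx with
  | nil => rfl
  | cons i rest ih =>
      simp only [cmpScanA, rcmp, gt_iff_lt]
      rcases lt_trichotomy (PySem.List.pyGetD ma i 0) (PySem.List.pyGetD t i 0) with h | h | h
      · simp [h]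
        exact fun h2 => absurd h2 (by omega)
      · simp [h, ih]
      · simp [h]
        exact fun h2 => absurd h2 (by omega)

theorem betterGoB_eq (x y : List Int) (idx : List Int) :
    betterGoB x y idx = true ↔ rcmp y x idx = .lt := by
  induction idx with
  | nil => simp [betterGoB, rcmp]
  | cons i rest ih =>
      simp only [betterGoB, rcmp, gt_iff_lt]
      rcases lt_trichotomy (PySem.List.pyGetD x i 0) (PySem.List.pyGetD y i 0) with h | h | h
      · simp [ne_of_lt h, h, not_lt.mpr (le_of_lt h)]
      · simp [h, ih]
      · simp [ne_of_gt h, h, not_lt.mpr (le_of_lt h)]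

theorem betterB_iff (d : Int) (iron : List Int) (bd : Int) (bi : List Int) :
    betterB d iron bd bi = true ↔ eLt (bd, bi) (d, iron) := by
  unfold betterB eLt rlt
  by_cases h : d = bd
  · subst h; simp [betterGoB_eq, idx11]
  · simp only [ne_eq, h, not_false_iff, if_pos, decide_eq_true_eq, gt_iff_lt]
    constructor
    · intro hlt; exact Or.inl hlt
    · rintro (hlt | ⟨he, _⟩)
      · exact hlt
      · exact absurd he.symm h

-- ---------- B side: dfs = fold over subsetsN ----------

theorem dfsB_eq_foldl (n : Int) (info : List Int) :
    ∀ (k : Nat) (chosen : List Int) (best : Option (Int × List Int)),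
      dfsB n info ((k : Int) - 1) chosen best =
        (subsetsN k).foldl (fun b e => leafB n info (chosen ++ e) b) best := by
  intro k
  induction k with
  | zero =>
      intro chosen best
      rw [dfsB]
      norm_num [subsetsN]
  | succ k ih =>
      intro chosen best
      have hk : ((k + 1 : Nat) : Int) - 1 = (k : Int) := by push_cast; ring
      rw [dfsB, hk]
      rw [if_neg (by omega)]
      simp only [subsetsN, List.foldl_append, List.foldl_map]
      rw [ih (chosen ++ [(k : Int)]) best]
      have he : ∀ (b : Option (Int × List Int)) (e : List Int),
          leafB n info (chosen ++ [(k : Int)] ++ e) b = leafB n info (chosen ++ (k : Int) :: e) b := by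
        intro b e; rw [List.append_assoc]; rfl
      rw [List.foldl_ext _ _ _ (fun b e _ => he b e)]
      exact ih chosen _

theorem mem_subsetsN (k : Nat) (e : List Int) :
    e ∈ subsetsN k ↔ e.Sublist (dlistN k) := by
  induction k generalizing e with
  | zero => simp [subsetsN, dlistN]
  | succ k ih =>
      simp only [subsetsN, dlistN, List.mem_append, List.mem_map, List.sublist_cons_iff]
      constructor
      · rintro (⟨r, hr, rfl⟩ | h)
        · exact Or.inr ⟨r, rfl, (ih r).mp hr⟩
        · exact Or.inl ((ih e).mp h)
      · rintro (h | ⟨r, rfl, hr⟩)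
        · exact Or.inr ((ih e).mpr h)
        · exact Or.inl ⟨r, (ih r).mpr hr, rfl⟩

-- ---------- combinations ----------

theorem mem_combosA (xs : List Int) : ∀ (k : Nat) (c : List Int),
    c ∈ combosA xs k ↔ c.Sublist xs ∧ c.length = k := by
  induction xs with
  | nil =>
      intro k c
      cases k with
      | zero => simp [combosA, List.sublist_nil, eq_comm]
      | succ k =>
          simp only [combosA, List.not_mem_nil, false_iff, not_and, List.sublist_nil]
          rintro rfl
          simp
  | cons x rest ih =>
      intro k c
      cases k with
      | zero =>
          simp only [combosA, List.mem_singleton, List.length_eq_zero_iff]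
          constructor
          · rintro rfl; exact ⟨List.nil_sublist _, rfl⟩
          · rintro ⟨_, rfl⟩; rfl
      | succ k =>
          simp only [combosA, List.mem_append, List.mem_map, List.sublist_cons_iff, ih]
          constructor
          · rintro (⟨r, ⟨hr, hl⟩, rfl⟩ | ⟨h, hl⟩)
            · exact ⟨Or.inr ⟨r, rfl, hr⟩, by simp [hl]⟩
            · exact ⟨Or.inl h, hl⟩
          · rintro ⟨h | ⟨r, rfl, hr⟩, hl⟩
            · exact Or.inr ⟨h, hl⟩
            · exact Or.inl ⟨r, ⟨hr, by simpa using hl⟩, rfl⟩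

theorem mem_combosAll (c : List Int) :
    c ∈ combosAll ↔ c.Sublist (PySem.List.pyRange 0 11 1) ∧ 1 ≤ c.length ∧ c.length ≤ 10 := by
  unfold combosAll
  simp only [List.mem_flatMap, mem_combosA, PySem.List.mem_pyRange_one]
  constructor
  · rintro ⟨i, ⟨h1, h2⟩, hs, hl⟩
    refine ⟨hs, ?_, ?_⟩ <;> omega
  · rintro ⟨hs, h1, h2⟩
    exact ⟨(c.length : Int), ⟨by omega, by omega⟩, hs, by simp⟩

-- ---------- per-candidate bridge ----------

theorem sorted_rev_of_asc (c : List Int) (hc : c.Sublist (PySem.List.pyRange 0 11 1)) :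
    PySem.List.sorted c (fun x => x) true = c.reverse := by
  apply PySem.List.sorted_rev_eq_of_perm_of_pairwise_gt
  · exact c.reverse_perm
  · rw [List.pairwise_reverse]
    exact List.Pairwise.sublist hc (by decide : (PySem.List.pyRange 0 11 1).Pairwise (· < ·))

theorem alloc_eval (info : List Int) :
    ∀ (d : List Int) (hd : d ≠ []) (iron : List Int) (arrow : Int),
      allocA info d iron arrow =
        (match evalGoB info d iron arrow with
         | .inl i => i
         | .inr (i, a) =>
             PySem.List.pySetD i (10 - d.getLast hd)
               (PySem.List.pyGetD i (10 - d.getLast hd) 0 + a)) := by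
  intro d
  induction d with
  | nil => intro hd; exact absurd rfl hd
  | cons s rest ih =>
      intro hd iron arrow
      cases rest with
      | nil =>
          simp only [allocA, evalGoB]
          by_cases h : arrow < PySem.List.pyGetD info (10 - s) 0 + 1
          · rw [if_pos h, if_pos h]
          · rw [if_neg h, if_neg h]
            simp
      | cons r rs =>
          conv_lhs => rw [allocA]
          conv_rhs => rw [evalGoB]
          by_cases h : arrow < PySem.List.pyGetD info (10 - s) 0 + 1
          · rw [if_pos h, if_pos h]
          · rw [if_neg h, if_neg h]
            dsimp only
            rw [ih (by simp)]
            have hgl : (s :: r :: rs).getLast hd = (r :: rs).getLast (by simp) :=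
              List.getLast_cons _
            simp only [hgl]

theorem score_margin (info iron : List Int) :
    ∀ (idx : List Int) (p : Int × Int) (d : Int),
      (idx.foldl (scoreStepA info iron) p).2 - (idx.foldl (scoreStepA info iron) p).1
        = p.2 - p.1 +
          (idx.foldl (fun diff s =>
              let a := PySem.List.pyGetD info (10 - s) 0
              let r := PySem.List.pyGetD iron (10 - s) 0
              if a = 0 ∧ r = 0 then diff
              else diff + (if a < r then s else -s)) d - d) := by
  intro idx
  induction idx with
  | nil => intro p d; simp
  | cons i rest ih =>
      intro p d
      simp only [List.foldl_cons, scoreStepA]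
      by_cases h1 : PySem.List.pyGetD info (10 - i) 0 = 0 ∧ PySem.List.pyGetD iron (10 - i) 0 = 0
      · rw [if_pos h1, if_pos h1]
        have := ih p d
        omega
      · rw [if_neg h1, if_neg h1]
        by_cases h2 : PySem.List.pyGetD info (10 - i) 0 < PySem.List.pyGetD iron (10 - i) 0
        · rw [if_pos h2, if_pos h2]
          have := ih (p.1, p.2 + i) (d + i)
          simp only at this
          omega
        · rw [if_neg h2, if_neg h2]
          have := ih (p.1 + i, p.2) (d + -i)
          simp only at this
          omega

-- the central bridge: on a nonempty ascending sublist c of [0..10],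
-- check_win on c is B's evaluation of the reversed (descending) selection
theorem bridge (n : Int) (info : List Int) (c : List Int)
    (hc : c.Sublist (PySem.List.pyRange 0 11 1)) (hne : c ≠ []) :
    check_win info c n =
      if 0 < (valB n info c.reverse).1 then
        ((-1) * (valB n info c.reverse).1, (valB n info c.reverse).2)
      else (0, [-1]) := by
  have hrev : c.reverse ≠ [] := by simpa using hne
  have hiron : allocA info c.reverse (List.replicate 11 0) n = evalB n info c.reverse := by
    rw [alloc_eval info c.reverse hrev]
    unfold evalB
    cases h : evalGoB info c.reverse (List.replicate 11 0) n with
    | inl i => rfl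
    | inr p =>
        obtain ⟨i, a⟩ := p
        dsimp only
        rw [PySem.List.pyGetD_neg_one c.reverse 0 hrev]
  unfold check_win
  dsimp only
  rw [sorted_rev_of_asc c hc, hiron]
  have hq : (scoreStepA info (evalB n info c.reverse) (0, 0) 0).2
      - (scoreStepA info (evalB n info c.reverse) (0, 0) 0).1 = 0 := by
    unfold scoreStepA; dsimp only; split_ifs <;> simp
  have hsm := score_margin info (evalB n info c.reverse) (PySem.List.pyRange 1 11 1)
    (scoreStepA info (evalB n info c.reverse) (0, 0) 0) 0
  have h0 : PySem.List.pyRange 0 11 1 = 0 :: PySem.List.pyRange 1 11 1 := by decide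
  have hmb : ((PySem.List.pyRange 0 11 1).foldl (scoreStepA info (evalB n info c.reverse)) (0, 0)).2
      - ((PySem.List.pyRange 0 11 1).foldl (scoreStepA info (evalB n info c.reverse)) (0, 0)).1
      = marginB info (evalB n info c.reverse) := by
    rw [h0, List.foldl_cons]
    unfold marginB
    omega
  have hv1 : (valB n info c.reverse).1 = marginB info (evalB n info c.reverse) := rfl
  have hv2 : (valB n info c.reverse).2 = evalB n info c.reverse := rfl
  rw [hv1, hv2]
  by_cases hpos : 0 < marginB info (evalB n info c.reverse)
  · rw [if_pos (by omega : ((PySem.List.pyRange 0 11 1).foldl (scoreStepA info (evalB n info c.reverse)) (0, 0)).2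
        > ((PySem.List.pyRange 0 11 1).foldl (scoreStepA info (evalB n info c.reverse)) (0, 0)).1),
      if_pos hpos]
    have hab : ((((PySem.List.pyRange 0 11 1).foldl (scoreStepA info (evalB n info c.reverse)) (0, 0)).2
        - ((PySem.List.pyRange 0 11 1).foldl (scoreStepA info (evalB n info c.reverse)) (0, 0)).1).natAbs : Int)
        = marginB info (evalB n info c.reverse) := by omega
    rw [hab]
  · rw [if_neg (by omega : ¬ ((PySem.List.pyRange 0 11 1).foldl (scoreStepA info (evalB n info c.reverse)) (0, 0)).2
        > ((PySem.List.pyRange 0 11 1).foldl (scoreStepA info (evalB n info c.reverse)) (0, 0)).1),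
      if_neg hpos]

-- ---------- fold characterizations ----------

theorem eLt_irrefl (v : Int × List Int) : ¬ eLt v v := by
  unfold eLt rlt
  rintro (h | ⟨_, h⟩)
  · omega
  · rw [rcmp_self] at h; exact absurd h (by decide)

theorem rcmp_right_eq (x y z : List Int) (idx : List Int) (h : rcmp y z idx = .eq) :
    rcmp x y idx = rcmp x z idx := by
  induction idx with
  | nil => rfl
  | cons i rest ih =>
      simp only [rcmp] at h ⊢
      rcases lt_trichotomy (PySem.List.pyGetD y i 0) (PySem.List.pyGetD z i 0) with a | a | a
      · rw [if_pos a] at h; exact absurd h (by decide)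
      · rw [a]
        rw [if_neg (by omega), if_neg (by omega)] at h
        by_cases hx : PySem.List.pyGetD x i 0 < PySem.List.pyGetD z i 0
        · rw [if_pos hx, if_pos hx]
        · rw [if_neg hx, if_neg hx]
          by_cases hx2 : PySem.List.pyGetD z i 0 < PySem.List.pyGetD x i 0
          · rw [if_pos hx2, if_pos hx2]
          · rw [if_neg hx2, if_neg hx2]
            exact ih h
      · rw [if_neg (by omega), if_pos a] at h; exact absurd h (by decide)

theorem leafB_of_not_good (n : Int) (info : List Int) (c : List Int)
    (b : Option (Int × List Int)) (h : ¬ goodB n info c) : leafB n info c b = b := by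
  unfold leafB
  by_cases hl : 1 ≤ c.length ∧ c.length ≤ 10
  · rw [if_pos hl]
    dsimp only
    have hd : ¬ 0 < marginB info (evalB n info c) := fun hpos => h ⟨hl.1, hl.2, hpos⟩
    simp [hd]
  · rw [if_neg hl]

theorem leafB_of_none (n : Int) (info : List Int) (c : List Int)
    (h : goodB n info c) : leafB n info c none = some (valB n info c) := by
  unfold leafB
  rw [if_pos ⟨h.1, h.2.1⟩]
  dsimp only
  rw [if_pos (by simpa using h.2.2)]
  rfl

theorem leafB_of_some_lt (n : Int) (info : List Int) (c : List Int) (u : Int × List Int)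
    (h : goodB n info c) (hlt : eLt u (valB n info c)) :
    leafB n info c (some u) = some (valB n info c) := by
  unfold leafB
  rw [if_pos ⟨h.1, h.2.1⟩]
  dsimp only
  rw [if_pos]
  · rfl
  · simp only [Bool.and_eq_true, decide_eq_true_eq]
    refine ⟨h.2.2, ?_⟩
    rw [betterB_iff]
    simpa using hlt

theorem leafB_of_some_not_lt (n : Int) (info : List Int) (c : List Int) (u : Int × List Int)
    (h : goodB n info c) (hlt : ¬ eLt u (valB n info c)) :
    leafB n info c (some u) = some u := by
  unfold leafB
  rw [if_pos ⟨h.1, h.2.1⟩]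
  dsimp only
  rw [if_neg]
  simp only [Bool.and_eq_true, decide_eq_true_eq, not_and]
  intro _
  rw [betterB_iff]
  simpa using hlt

-- every value the B fold can hold has an iron of length 11
theorem Bfold_char (n : Int) (info : List Int) :
    ∀ (cs : List (List Int)) (b : Option (Int × List Int)),
      (∀ u, b = some u → u.2.length = 11) →
      ((cs.foldl (fun b c => leafB n info c b) b = none → b = none ∧ ∀ c ∈ cs, ¬ goodB n info c)
       ∧ (b = none → (∀ c ∈ cs, ¬ goodB n info c) → cs.foldl (fun b c => leafB n info c b) b = none)
       ∧ (∀ v, cs.foldl (fun b c => leafB n info c b) b = some v →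
            (b = some v ∨ ∃ c ∈ cs, goodB n info c ∧ valB n info c = v)
            ∧ (∀ c ∈ cs, goodB n info c → ¬ eLt v (valB n info c))
            ∧ (∀ u, b = some u → ¬ eLt v u))) := by
  intro cs
  induction cs with
  | nil =>
      intro b hlen
      simp only [List.foldl_nil]
      refine ⟨fun h => ⟨h, by simp⟩, fun h _ => h, fun v hv => ?_⟩
      refine ⟨Or.inl hv, by simp, fun u hu => ?_⟩
      rw [hv] at hu
      cases hu
      exact eLt_irrefl v
  | cons c cs ih =>
      intro b hlen
      simp only [List.foldl_cons]
      have hlen' : ∀ u, leafB n info c b = some u → u.2.length = 11 := by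
        intro u hu
        by_cases hg : goodB n info c
        · cases b with
          | none =>
              rw [leafB_of_none n info c hg] at hu
              cases hu
              exact length_evalB n info c
          | some u0 =>
              by_cases hlt : eLt u0 (valB n info c)
              · rw [leafB_of_some_lt n info c u0 hg hlt] at hu
                cases hu
                exact length_evalB n info c
              · rw [leafB_of_some_not_lt n info c u0 hg hlt] at hu
                exact hlen u hu
        · rw [leafB_of_not_good n info c b hg] at hu
          exact hlen u hu
      obtain ⟨ih1, ih2, ih3⟩ := ih (leafB n info c b) hlen'
      refine ⟨?_, ?_, ?_⟩
      · intro hnone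
        obtain ⟨hb', htail⟩ := ih1 hnone
        by_cases hg : goodB n info c
        · exfalso
          cases b with
          | none => rw [leafB_of_none n info c hg] at hb'; cases hb'
          | some u0 =>
              by_cases hlt : eLt u0 (valB n info c)
              · rw [leafB_of_some_lt n info c u0 hg hlt] at hb'; cases hb'
              · rw [leafB_of_some_not_lt n info c u0 hg hlt] at hb'; cases hb'
        · rw [leafB_of_not_good n info c b hg] at hb'
          refine ⟨hb', ?_⟩
          intro c' hc'
          rcases List.mem_cons.mp hc' with rfl | h
          · exact hg
          · exact htail c' h
      · intro hb hall
        subst hb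
        have hg : ¬ goodB n info c := hall c (by simp)
        have hlb := leafB_of_not_good n info c none hg
        rw [hlb] at ih2 ⊢
        exact ih2 rfl (fun c' h => hall c' (by simp [h]))
      · intro v hv
        obtain ⟨horig, htail, hinit⟩ := ih3 v hv
        by_cases hg : goodB n info c
        · have hstep : ∀ u0, b = some u0 → ¬ eLt u0 (valB n info c) →
              leafB n info c b = b := by
            intro u0 hb hlt
            rw [hb]; exact leafB_of_some_not_lt n info c u0 hg hlt
          refine ⟨?_, ?_, ?_⟩
          · -- origin
            rcases horig with hb' | ⟨c', hc', hg', hval⟩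
            · cases b with
              | none =>
                  rw [leafB_of_none n info c hg] at hb'
                  cases hb'
                  exact Or.inr ⟨c, by simp, hg, rfl⟩
              | some u0 =>
                  by_cases hlt : eLt u0 (valB n info c)
                  · rw [leafB_of_some_lt n info c u0 hg hlt] at hb'
                    cases hb'
                    exact Or.inr ⟨c, by simp, hg, rfl⟩
                  · rw [leafB_of_some_not_lt n info c u0 hg hlt] at hb'
                    exact Or.inl hb'
            · exact Or.inr ⟨c', by simp [hc'], hg', hval⟩
          · -- all good in c :: cs beaten
            intro c' hc'
            rcases List.mem_cons.mp hc' with rfl | hc'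
            · -- the head
              intro hgc'
              cases b with
              | none =>
                  exact hinit (valB n info c') (leafB_of_none n info c' hgc')
              | some u0 =>
                  by_cases hlt : eLt u0 (valB n info c')
                  · exact hinit (valB n info c') (leafB_of_some_lt n info c' u0 hgc' hlt)
                  · have hb' : leafB n info c' (some u0) = some u0 :=
                      leafB_of_some_not_lt n info c' u0 hgc' hlt
                    have hvu : ¬ eLt v u0 := hinit u0 hb'
                    have h11u : u0.2.length = 11 := hlen u0 rfl
                    have h11c : (valB n info c').2.length = 11 := length_evalB n info c'
                    rcases eLt_tricho h11u h11c with h | h | h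
                    · exact absurd h hlt
                    · exact fun hvc => hvu (eLt_trans hvc h)
                    · rw [← h]
                      exact hvu
            · exact htail c' hc'
          · -- initial value beaten
            intro u0 hb
            subst hb
            by_cases hlt : eLt u0 (valB n info c)
            · have hb' : leafB n info c (some u0) = some (valB n info c) :=
                leafB_of_some_lt n info c u0 hg hlt
              have := hinit (valB n info c) hb'
              intro hvu
              exact this (eLt_trans hvu hlt)
            · have hb' : leafB n info c (some u0) = some u0 :=
                leafB_of_some_not_lt n info c u0 hg hlt
              exact hinit u0 hb'
        · have hlb := leafB_of_not_good n info c b hg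
          rw [hlb] at horig hinit
          refine ⟨?_, ?_, hinit⟩
          · rcases horig with h | ⟨c', hc', h⟩
            · exact Or.inl h
            · exact Or.inr ⟨c', by simp [hc'], h⟩
          · intro c' hc'
            rcases List.mem_cons.mp hc' with rfl | hcc
            · exact fun h2 => absurd h2 hg
            · exact htail c' hcc

theorem Afold2_char (ws : List (Int × List Int)) :
    ∀ (ma : List Int),
      ((ws.foldl (fun ma w => cmpScanA ma w.2 (PySem.List.pyRange 10 (-1) (-1))) ma = ma
        ∨ ∃ w ∈ ws, ws.foldl (fun ma w => cmpScanA ma w.2 (PySem.List.pyRange 10 (-1) (-1))) ma = w.2)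
       ∧ (∀ w ∈ ws, ¬ rlt (ws.foldl (fun ma w => cmpScanA ma w.2 (PySem.List.pyRange 10 (-1) (-1))) ma) w.2)
       ∧ ¬ rlt (ws.foldl (fun ma w => cmpScanA ma w.2 (PySem.List.pyRange 10 (-1) (-1))) ma) ma) := by
  induction ws with
  | nil =>
      intro ma
      refine ⟨Or.inl rfl, by simp, ?_⟩
      unfold rlt
      simp only [List.foldl_nil]
      rw [rcmp_self]
      decide
  | cons w ws ih =>
      intro ma
      simp only [List.foldl_cons]
      rw [cmpScanA_eq]
      by_cases h : rcmp ma w.2 (PySem.List.pyRange 10 (-1) (-1)) = .lt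
      · rw [if_pos h]
        obtain ⟨m1, m2, m3⟩ := ih w.2
        refine ⟨?_, ?_, ?_⟩
        · rcases m1 with he | ⟨w', hw', he⟩
          · exact Or.inr ⟨w, by simp, he⟩
          · exact Or.inr ⟨w', by simp [hw'], he⟩
        · intro w' hw'
          rcases List.mem_cons.mp hw' with rfl | hw'
          · exact m3
          · exact m2 w' hw'
        · intro hr
          unfold rlt idx11 at hr m3
          exact m3 (rcmp_trans_lt _ _ _ _ hr h)
      · rw [if_neg h]
        obtain ⟨m1, m2, m3⟩ := ih ma
        refine ⟨?_, ?_, m3⟩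
        · rcases m1 with he | ⟨w', hw', he⟩
          · exact Or.inl he
          · exact Or.inr ⟨w', by simp [hw'], he⟩
        · intro w' hw'
          rcases List.mem_cons.mp hw' with rfl | hw'
          · cases hc : rcmp ma w'.2 (PySem.List.pyRange 10 (-1) (-1)) with
            | lt => exact absurd hc h
            | eq =>
                intro hr
                unfold rlt idx11 at hr m3
                rw [rcmp_right_eq _ _ _ _ hc] at m3
                exact m3 hr
            | gt =>
                intro hr
                unfold rlt idx11 at hr m3
                have hswap : rcmp w'.2 ma (PySem.List.pyRange 10 (-1) (-1)) = .lt := by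
                  rw [rcmp_swap, hc]; rfl
                exact m3 (rcmp_trans_lt _ _ _ _ hr hswap)
          · exact m2 w' hw'

def Inv1 (n : Int) (info : List Int) (seen : List (List Int)) (wl : List (Int × List Int)) : Prop :=
  (wl = [] → ∀ c ∈ seen, ¬ winA n info c)
  ∧ (wl ≠ [] → ∃ m,
      (∀ x ∈ wl, x.1 = m ∧ ∃ c ∈ seen, winA n info c ∧ check_win info c n = x)
      ∧ (∀ c ∈ seen, winA n info c → m ≤ (check_win info c n).1)
      ∧ (∀ c ∈ seen, winA n info c → (check_win info c n).1 = m → check_win info c n ∈ wl))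

theorem step1 (n : Int) (info : List Int) (seen : List (List Int))
    (wl : List (Int × List Int)) (c : List Int) (h : Inv1 n info seen wl) :
    Inv1 n info (seen ++ [c]) (stepWin info n wl c) := by
  obtain ⟨h1, h2⟩ := h
  unfold stepWin
  by_cases hw : (check_win info c n).2 ≠ [-1]
  swap
  · rw [if_neg hw]
    constructor
    · intro he c' hc'
      rcases List.mem_append.mp hc' with hc' | hc'
      · exact h1 he c' hc'
      · rw [List.mem_singleton.mp hc']
        exact fun hwa => hw hwa
    · intro hne
      obtain ⟨m, ha, hb, hc2⟩ := h2 hne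
      refine ⟨m, ?_, ?_, ?_⟩
      · intro x hx
        obtain ⟨hx1, c0, hc0, hx2⟩ := ha x hx
        exact ⟨hx1, c0, List.mem_append.mpr (Or.inl hc0), hx2⟩
      · intro c' hc' hwc'
        rcases List.mem_append.mp hc' with hc' | hc'
        · exact hb c' hc' hwc'
        · rw [List.mem_singleton.mp hc'] at hwc'
          exact absurd hwc' hw
      · intro c' hc' hwc' hm
        rcases List.mem_append.mp hc' with hc' | hc'
        · exact hc2 c' hc' hwc' hm
        · rw [List.mem_singleton.mp hc'] at hwc'
          exact absurd hwc' hw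
  · rw [if_pos hw]
    cases wl with
    | nil =>
        show Inv1 n info (seen ++ [c])
          (if (-1) * (check_win info c n).1 < (-1) * (check_win info c n).1 then [check_win info c n]
           else if (check_win info c n).1 = (check_win info c n).1
             then [check_win info c n] ++ [check_win info c n] else [check_win info c n])
        rw [if_neg (lt_irrefl _), if_pos rfl]
        constructor
        · intro he; exact absurd he (by simp)
        · intro _
          refine ⟨(check_win info c n).1, ?_, ?_, ?_⟩
          · intro x hx
            have hx' : x = check_win info c n := by simpa using hx
            subst hx'
            exact ⟨rfl, c, by simp, hw, rfl⟩
          · intro c' hc' hwc'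
            rcases List.mem_append.mp hc' with hc' | hc'
            · exact absurd hwc' (h1 rfl c' hc')
            · rw [List.mem_singleton.mp hc']
          · intro c' hc' hwc' hm
            rcases List.mem_append.mp hc' with hc' | hc'
            · exact absurd hwc' (h1 rfl c' hc')
            · rw [List.mem_singleton.mp hc']
              simp
      | cons y t =>
        simp only [List.isEmpty_cons, Bool.false_eq_true, if_false, List.headD_cons]
        obtain ⟨m, ha, hb, hc2⟩ := h2 (by simp)
        have hy : y.1 = m := (ha y (by simp)).1
        by_cases hlt : (-1) * y.1 < (-1) * (check_win info c n).1
        · rw [if_pos hlt]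
          constructor
          · intro he; exact absurd he (by simp)
          · intro _
            refine ⟨(check_win info c n).1, ?_, ?_, ?_⟩
            · intro x hx
              have hx' : x = check_win info c n := by simpa using hx
              subst hx'
              exact ⟨rfl, c, by simp, hw, rfl⟩
            · intro c' hc' hwc'
              rcases List.mem_append.mp hc' with hc' | hc'
              · have := hb c' hc' hwc'
                omega
              · rw [List.mem_singleton.mp hc']
            · intro c' hc' hwc' hm
              rcases List.mem_append.mp hc' with hc' | hc'
              · have := hb c' hc' hwc'
                omega
              · rw [List.mem_singleton.mp hc']
                simp
        · rw [if_neg hlt]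
          by_cases heq : y.1 = (check_win info c n).1
          · rw [if_pos heq]
            constructor
            · intro he; exact absurd he (by simp)
            · intro _
              refine ⟨m, ?_, ?_, ?_⟩
              · intro x hx
                rcases List.mem_append.mp hx with hx | hx
                · obtain ⟨hx1, c0, hc0, hx2⟩ := ha x hx
                  exact ⟨hx1, c0, List.mem_append.mpr (Or.inl hc0), hx2⟩
                · rw [List.mem_singleton.mp hx]
                  exact ⟨by omega, c, by simp, hw, rfl⟩
              · intro c' hc' hwc'
                rcases List.mem_append.mp hc' with hc' | hc'
                · exact hb c' hc' hwc'
                · rw [List.mem_singleton.mp hc']; omega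
              · intro c' hc' hwc' hm
                rcases List.mem_append.mp hc' with hc' | hc'
                · exact List.mem_append.mpr (Or.inl (hc2 c' hc' hwc' hm))
                · rw [List.mem_singleton.mp hc']
                  simp
          · rw [if_neg heq]
            constructor
            · intro he; exact absurd he (by simp)
            · intro _
              refine ⟨m, ?_, ?_, ?_⟩
              · intro x hx
                obtain ⟨hx1, c0, hc0, hx2⟩ := ha x hx
                exact ⟨hx1, c0, List.mem_append.mpr (Or.inl hc0), hx2⟩
              · intro c' hc' hwc'
                rcases List.mem_append.mp hc' with hc' | hc'
                · exact hb c' hc' hwc'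
                · rw [List.mem_singleton.mp hc']; omega
              · intro c' hc' hwc' hm
                rcases List.mem_append.mp hc' with hc' | hc'
                · exact hc2 c' hc' hwc' hm
                · rw [List.mem_singleton.mp hc'] at hwc' hm ⊢
                  omega

theorem Afold1_char (n : Int) (info : List Int) :
    ∀ (cs seen : List (List Int)) (wl : List (Int × List Int)),
      Inv1 n info seen wl → Inv1 n info (seen ++ cs) (cs.foldl (stepWin info n) wl) := by
  intro cs
  induction cs with
  | nil => intro seen wl h; simpa using h
  | cons c cs ih =>
      intro seen wl h
      have := ih (seen ++ [c]) (stepWin info n wl c) (step1 n info seen wl c h)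
      simpa using this

-- ===== VERDICT (by name: the statement is the Claim_ definition above) =====
theorem combosAll_fold (n : Int) (info : List Int) :
    (PySem.List.pyRange 1 11 1).foldl
        (fun wl i => (combosA (PySem.List.pyRange 0 11 1) i.toNat).foldl (stepWin info n) wl) []
      = combosAll.foldl (stepWin info n) [] := by
  exact (List.foldl_flatMap ..).symm

theorem valB_iron_ne (n : Int) (info : List Int) (e : List Int) :
    (valB n info e).2 ≠ [-1] := by
  intro h
  have hl := length_evalB n info e
  have h2 : (valB n info e).2 = evalB n info e := rfl
  rw [h2] at h
  rw [h] at hl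
  simp at hl

theorem corr1 (n : Int) (info : List Int) (e : List Int)
    (he : e ∈ subsetsN 11) (hg : goodB n info e) :
    e.reverse ∈ combosAll ∧ winA n info e.reverse ∧
      check_win info e.reverse n = ((-1) * (valB n info e).1, (valB n info e).2) := by
  have hsub : e.Sublist (dlistN 11) := (mem_subsetsN 11 e).mp he
  have hd : dlistN 11 = (PySem.List.pyRange 0 11 1).reverse := by decide
  rw [hd] at hsub
  have hrev : e.reverse.Sublist (PySem.List.pyRange 0 11 1) := by
    have h2 := List.reverse_sublist.mpr hsub
    simpa using h2
  have hne : e ≠ [] := by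
    intro h
    rw [h] at hg
    simpa using hg.1
  have hner : e.reverse ≠ [] := by simpa using hne
  have hb := bridge n info e.reverse hrev hner
  rw [List.reverse_reverse] at hb
  rw [hb, if_pos hg.2.2]
  refine ⟨?_, ?_, rfl⟩
  · rw [mem_combosAll]
    exact ⟨hrev, by simpa using hg.1, by simpa using hg.2.1⟩
  · unfold winA
    rw [hb, if_pos hg.2.2]
    exact valB_iron_ne n info e

theorem corr2 (n : Int) (info : List Int) (c : List Int)
    (hc : c ∈ combosAll) (hwc : winA n info c) :
    c.reverse ∈ subsetsN 11 ∧ goodB n info c.reverse ∧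
      check_win info c n = ((-1) * (valB n info c.reverse).1, (valB n info c.reverse).2) := by
  obtain ⟨hsub, hl1, hl2⟩ := (mem_combosAll c).mp hc
  have hne : c ≠ [] := by
    intro h
    rw [h] at hl1
    simp at hl1
  have hb := bridge n info c hsub hne
  by_cases hpos : 0 < (valB n info c.reverse).1
  · refine ⟨?_, ⟨?_, ?_, hpos⟩, ?_⟩
    · rw [mem_subsetsN]
      have hd : dlistN 11 = (PySem.List.pyRange 0 11 1).reverse := by decide
      rw [hd]
      exact List.reverse_sublist.mpr hsub
    · simpa using hl1
    · simpa using hl2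
    · rw [hb, if_pos hpos]
  · exfalso
    unfold winA at hwc
    rw [hb, if_neg hpos] at hwc
    exact hwc rfl

theorem solution_spec : Claim_equal_solution := by
  intro n info _ _
  unfold Spec_solution solution solution_alt
  dsimp only
  rw [combosAll_fold n info]
  have hBfold : dfsB n info 10 [] none
      = (subsetsN 11).foldl (fun b c => leafB n info c b) none := by
    have h := dfsB_eq_foldl n info 11 [] none
    norm_num at h
    rw [h]
  rw [hBfold]
  have hInv : Inv1 n info combosAll (combosAll.foldl (stepWin info n) []) := by
    have h0 : Inv1 n info [] [] := ⟨fun _ => by simp, fun h => absurd rfl h⟩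
    have := Afold1_char n info combosAll [] [] h0
    simpa using this
  have hBchar := Bfold_char n info (subsetsN 11) none (by simp)
  cases hwl : combosAll.foldl (stepWin info n) [] with
  | nil =>
      rw [hwl] at hInv
      have hnone : (subsetsN 11).foldl (fun b c => leafB n info c b) none = none := by
        apply hBchar.2.1 rfl
        intro e he hg
        obtain ⟨hmem, hwin, _⟩ := corr1 n info e he hg
        exact absurd hwin (hInv.1 rfl e.reverse hmem)
      rw [hnone]
      simp
  | cons x t =>
      rw [hwl] at hInv
      obtain ⟨m, ha, hb2, hc2⟩ := hInv.2 (by simp)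
      simp only [List.isEmpty_cons, Bool.false_eq_true, if_false, List.headD_cons]
      obtain ⟨hA1, hA2, hA3⟩ := Afold2_char (x :: t) x.2
      have hy : ∃ y ∈ x :: t,
          (x :: t).foldl (fun ma w => cmpScanA ma w.2 (PySem.List.pyRange 10 (-1) (-1))) x.2 = y.2 := by
        rcases hA1 with he | ⟨w, hw, he⟩
        · exact ⟨x, by simp, he⟩
        · exact ⟨w, hw, he⟩
      obtain ⟨y, hymem, hyr⟩ := hy
      obtain ⟨hym, c1, hc1mem, hwin1, hcw1⟩ := ha y hymem
      obtain ⟨hrev1, hg1, hval1⟩ := corr2 n info c1 hc1mem hwin1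
      -- u := valB n info c1.reverse ; y = (-u.1, u.2)
      have hy1 : y.1 = (-1) * (valB n info c1.reverse).1 := by rw [← hcw1, hval1]
      have hy2 : y.2 = (valB n info c1.reverse).2 := by rw [← hcw1, hval1]
      -- B's fold is some v
      cases hr : (subsetsN 11).foldl (fun b c => leafB n info c b) none with
      | none =>
          exfalso
          have hall := (hBchar.1 hr).2
          exact absurd hg1 (hall c1.reverse hrev1)
      | some v =>
          obtain ⟨horig, hmax, _⟩ := hBchar.2.2 v hr
          have hev : ∃ ev ∈ subsetsN 11, goodB n info ev ∧ valB n info ev = v := by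
            rcases horig with h | h
            · cases h
            · exact h
          obtain ⟨ev, hevmem, hevg, hevval⟩ := hev
          -- u is maximal among all good values
          have humax : ∀ e ∈ subsetsN 11, goodB n info e →
              ¬ eLt (valB n info c1.reverse) (valB n info e) := by
            intro e he hg hlt
            obtain ⟨hmem, hwin, hcw⟩ := corr1 n info e he hg
            have hmle : m ≤ (check_win info e.reverse n).1 := hb2 e.reverse hmem hwin
            rw [hcw] at hmle
            have hmu : m = (-1) * (valB n info c1.reverse).1 := by rw [← hym, hy1]
            rcases hlt with hlt | ⟨heq, hrlt⟩
            · dsimp only at hmle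
              omega
            · -- equal margins: e's candidate is in the win list, beaten on the tie-break
              have hz : check_win info e.reverse n ∈ x :: t := by
                apply hc2 e.reverse hmem hwin
                rw [hcw]
                dsimp only
                omega
              have hnr := hA2 (check_win info e.reverse n) hz
              rw [hyr, hy2] at hnr
              rw [hcw] at hnr
              exact hnr hrlt
          have hnu : ¬ eLt v (valB n info c1.reverse) := hmax c1.reverse hrev1 hg1
          have hnv : ¬ eLt (valB n info c1.reverse) v := by
            rw [← hevval]
            exact humax ev hevmem hevg
          have huv : valB n info c1.reverse = v := by
            rcases eLt_tricho
                (show (valB n info c1.reverse).2.length = 11 from length_evalB n info c1.reverse)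
                (show v.2.length = 11 by rw [← hevval]; exact length_evalB n info ev)
                with h | h | h
            · exact absurd h hnv
            · exact absurd h hnu
            · exact h
          rw [hyr, hy2, huv]
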